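-- pv_equiv track=rewrite | github.com/Cagriucaroglu/chess_sim | yolo_project2/test3.py | sort_table_by_rows
-- ===== SOURCE A (Python) =====
-- def sort_table_by_rows(table, threshold):
--     # 1) Önce Dikey (Y) olarak sırala
--     table_sorted = sorted(table, key=lambda d: d['yc'])
--     rows = []  # her satır bir liste olacak
--
--     # 2) Satır gruplarını oluştur
--     for d in table_sorted:
--         if not rows:
--             # ilk hücreyi ilk satıra ekle
--             rows.append([d])
--         else:
--             # son satırın temsilcisi olarak ilk hücrenin yc'sini al
--             last_row = rows[-1]
--             lastrow_y = last_row[0]['yc']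
--             if abs(d['yc'] - lastrow_y) < threshold:
--                 # halen aynı satırda say, ekle
--                 last_row.append(d)
--             else:
--                 # yeni satır başlat
--                 rows.append([d])
--
--     # 3) Her satırı X'e göre sırala (soldan sağa)
--     for row in rows:
--         row.sort(key=lambda d: d['xc'])
--
--     # 4) Satırları düz listeye çevir
--     return [d for row in rows for d in row]
-- ===== SOURCE B (Python) =====
-- def sort_table_by_rows(table, threshold):
--     # Selection-based row peeling: no global pre-sort. Repeatedly take the
--     # minimum yc among the remaining cells as the row's baseline, split off
--     # the whole row (all cells within threshold of that baseline) in one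
--     # partition pass, and emit it ordered by the compound key (xc, yc).
--     if threshold <= 0:
--         # a nonpositive threshold puts every cell in its own row,
--         # i.e. the output is simply the cells in yc order
--         return sorted(table, key=lambda d: d['yc'])
--     remaining = list(table)
--     out = []
--     while remaining:
--         m = min(d['yc'] for d in remaining)
--         row = [d for d in remaining if d['yc'] - m < threshold]
--         remaining = [d for d in remaining if d['yc'] - m >= threshold]
--         out += sorted(row, key=lambda d: (d['xc'], d['yc']))
--     return out
-- ===== Notes on version B (the rewrite author's own statement) =====
-- stated objective: alternative
-- what changed: A sorts the whole table by yc, greedily groups the sorted sequence into row lists against an anchor, then sorts each row in place by xc; B never pre-sorts: it repeatedly extracts the minimum yc of the remaining cells, splits off the entire row in one partition pass over the unsorted remainder, and emits it ordered by the compound key (xc, yc), with a nonpositive threshold degenerating to a plain yc sort.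
import Mathlib
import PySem

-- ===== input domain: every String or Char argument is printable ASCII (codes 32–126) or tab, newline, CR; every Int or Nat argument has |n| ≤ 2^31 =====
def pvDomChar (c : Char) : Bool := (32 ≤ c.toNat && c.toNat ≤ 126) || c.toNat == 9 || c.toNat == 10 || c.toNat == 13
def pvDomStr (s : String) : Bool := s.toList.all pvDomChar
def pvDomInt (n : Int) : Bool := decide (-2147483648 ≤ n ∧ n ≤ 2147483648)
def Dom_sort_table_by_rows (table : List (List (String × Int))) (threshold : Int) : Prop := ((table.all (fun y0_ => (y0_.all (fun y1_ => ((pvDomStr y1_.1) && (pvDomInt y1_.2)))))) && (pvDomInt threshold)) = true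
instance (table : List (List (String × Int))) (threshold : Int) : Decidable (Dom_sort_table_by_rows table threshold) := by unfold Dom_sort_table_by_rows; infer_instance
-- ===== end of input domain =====

-- B replaces A's "sort everything by yc, group the sorted run, sort each row by xc"
-- by selection-based row peeling with no global pre-sort: repeatedly take the minimum
-- yc of the remaining cells, split off the whole row in one partition pass, and emit
-- it sorted by the compound key (xc, yc); an alternative algorithm, not claimed faster.

-- A cell, as both ports see it
abbrev pvCell : Type := List (String × Int)

-- ===== PORT A =====
-- d['yc'] / d['xc']: lookup in the Python dict built from the pairs (duplicate keys:
-- last wins, as in dict construction). Under Pre_ the key is present, so the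
-- `getD 0` default is never used.
def pvYc (d : pvCell) : Int := ((PySem.Dict.ofList d).get? "yc").getD 0
def pvXc (d : pvCell) : Int := ((PySem.Dict.ofList d).get? "xc").getD 0

-- the body of A's grouping loop ('if not rows / rows[-1] / append')
def pvStepA (threshold : Int) (rows : List (List pvCell)) (d : pvCell) : List (List pvCell) :=
  match rows.getLast? with
  | none => rows ++ [[d]]
  | some last_row =>
    if |pvYc d - pvYc (last_row.headD [])| < threshold then
      rows.dropLast ++ [last_row ++ [d]]
    else
      rows ++ [[d]]

def sort_table_by_rows (table : List (List (String × Int))) (threshold : Int) : List (List (String × Int)) :=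
  let table_sorted := PySem.List.sorted table (fun d => pvYc d) false
  let rows := table_sorted.foldl (pvStepA threshold) []
  (rows.map (fun row => PySem.List.sorted row (fun d => pvXc d) false)).flatten

-- ===== PORT B =====
-- B's while loop: peel off one row per iteration. Fuel = length of the remaining
-- list, a totality device only: with 1 ≤ threshold (guaranteed by B's early return)
-- each iteration removes at least the minimal cell, so the fuel never runs out.
def pvPeel (t : Int) : Nat → List pvCell → List pvCell
  | 0, _ => []
  | _ + 1, [] => []
  | fuel + 1, r0 :: rs =>
      let rem := r0 :: rs
      let m := (PySem.List.min? (rem.map (fun d => pvYc d)) (fun v => v)).getD 0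
      let row := rem.filter (fun d => decide (pvYc d - m < t))
      let rest := rem.filter (fun d => decide (t ≤ pvYc d - m))
      PySem.List.sorted2 row (fun d => pvXc d) (fun d => pvYc d) false ++ pvPeel t fuel rest

def sort_table_by_rows_alt (table : List (List (String × Int))) (threshold : Int) : List (List (String × Int)) :=
  if threshold ≤ 0 then
    PySem.List.sorted table (fun d => pvYc d) false
  else
    pvPeel threshold table.length table

-- ===== PRECONDITION & SPEC =====
-- Pre_ excludes exactly the tables with a cell lacking key "yc" or "xc": there the
-- Python A raises KeyError.
def Pre_sort_table_by_rows (table : List (List (String × Int))) (threshold : Int) : Prop :=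
  (table.all (fun d => (PySem.Dict.ofList d).contains "yc" && (PySem.Dict.ofList d).contains "xc")) = true
instance (table : List (List (String × Int))) (threshold : Int) : Decidable (Pre_sort_table_by_rows table threshold) := by unfold Pre_sort_table_by_rows; infer_instance

def pvWitness_sort_table_by_rows : (List (List (String × Int))) × Int :=
  ([[("xc", 1), ("yc", 2)], [("xc", 0), ("yc", 3)], [("xc", 4), ("yc", 9)]], 5)

def Spec_sort_table_by_rows (table : List (List (String × Int))) (threshold : Int) (out : List (List (String × Int))) : Prop := out = sort_table_by_rows_alt table threshold
instance (table : List (List (String × Int))) (threshold : Int) (out : List (List (String × Int))) : Decidable (Spec_sort_table_by_rows table threshold out) := by unfold Spec_sort_table_by_rows; infer_instance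

-- ===== CLAIM (what is proved, stated in full; the proofs are below) =====
def Claim_equal_sort_table_by_rows : Prop := ∀ (table : List (List (String × Int))) (threshold : Int), Dom_sort_table_by_rows table threshold → Pre_sort_table_by_rows table threshold → Spec_sort_table_by_rows table threshold (sort_table_by_rows table threshold)

-- ===== LEMMAS AND PROOFS =====

-- comparators used by the two ports' sorts, and shorthand folds for them
def pvBefY (a b : pvCell) : Bool := decide (pvYc a < pvYc b)
def pvBefX (a b : pvCell) : Bool := decide (pvXc a < pvXc b)
def pvLexBef (a b : pvCell) : Bool :=
  decide (pvXc a < pvXc b) || (!decide (pvXc b < pvXc a) && decide (pvYc a < pvYc b))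

def pvSortY (l : List pvCell) : List pvCell :=
  l.foldl (fun acc x => PySem.List.insertBy pvBefY x acc) []
def pvSortX (l : List pvCell) : List pvCell :=
  l.foldl (fun acc x => PySem.List.insertBy pvBefX x acc) []
def pvSortL (l : List pvCell) : List pvCell :=
  l.foldl (fun acc x => PySem.List.insertBy pvLexBef x acc) []

lemma pvSortY_eq (l : List pvCell) : PySem.List.sorted l (fun d => pvYc d) false = pvSortY l := rfl
lemma pvSortL_eq (l : List pvCell) :
    PySem.List.sorted2 l (fun d => pvXc d) (fun d => pvYc d) false = pvSortL l := rfl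

-- A's grouping of the yc-sorted list: current row h :: c' (anchor h)
def pvGroupsGo (t : Int) (h : pvCell) (c' : List pvCell) : List pvCell → List (List pvCell)
  | [] => [h :: c']
  | d :: rest =>
      if |pvYc d - pvYc h| < t then pvGroupsGo t h (c' ++ [d]) rest
      else (h :: c') :: pvGroupsGo t d [] rest

def pvGroups (t : Int) : List pvCell → List (List pvCell)
  | [] => []
  | d :: rest => pvGroupsGo t d [] rest

-- A's grouping fold builds pvGroups
lemma pvFoldA (t : Int) :
    ∀ (rest : List pvCell) (R : List (List pvCell)) (h : pvCell) (c' : List pvCell),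
      List.foldl (pvStepA t) (R ++ [h :: c']) rest = R ++ pvGroupsGo t h c' rest := by
  intro rest
  induction rest with
  | nil => intro R h c'; simp [pvGroupsGo]
  | cons d rest ih =>
      intro R h c'
      rw [List.foldl_cons]
      have hstep : pvStepA t (R ++ [h :: c']) d =
          if |pvYc d - pvYc h| < t then R ++ [h :: (c' ++ [d])]
          else (R ++ [h :: c']) ++ [[d]] := by
        simp [pvStepA]
      rw [hstep]
      by_cases hc : |pvYc d - pvYc h| < t
      · rw [if_pos hc, ih R h (c' ++ [d])]
        simp [pvGroupsGo, hc]
      · rw [if_neg hc, ih (R ++ [h :: c']) d []]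
        simp [pvGroupsGo, hc]

lemma pvFoldA0 (t : Int) (l : List pvCell) :
    List.foldl (pvStepA t) [] l = pvGroups t l := by
  cases l with
  | nil => rfl
  | cons d rest =>
      rw [List.foldl_cons]
      have hstep : pvStepA t [] d = [] ++ [d :: []] := rfl
      rw [hstep, pvFoldA t rest [] d []]
      rfl

lemma pvA_char (table : List (List (String × Int))) (t : Int) :
    sort_table_by_rows table t =
      ((pvGroups t (pvSortY table)).map (fun g => pvSortX g)).flatten := by
  simp only [sort_table_by_rows]
  rw [pvFoldA0]
  rfl

-- membership after an insertion fold (any comparator)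
lemma pvMem_foldl_insertBy (bef : pvCell → pvCell → Bool) :
    ∀ (P init : List pvCell) (x : pvCell),
      x ∈ P.foldl (fun acc y => PySem.List.insertBy bef y acc) init → x ∈ init ∨ x ∈ P := by
  intro P
  induction P with
  | nil => intro init x hx; exact Or.inl hx
  | cons p P ih =>
      intro init x hx
      rcases ih _ _ hx with h | h
      · rcases (PySem.List.mem_insertBy bef p x init).1 h with h' | h'
        · exact Or.inr (by simp [h'])
        · exact Or.inl h'
      · exact Or.inr (List.mem_cons_of_mem _ h)

-- insertion passes over a prefix it is not before (any comparator)
lemma pvInsertBy_pass (bef : pvCell → pvCell → Bool) (x : pvCell) :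
    ∀ (ys zs : List pvCell), (∀ y ∈ ys, bef x y = false) →
      PySem.List.insertBy bef x (ys ++ zs) = ys ++ PySem.List.insertBy bef x zs := by
  intro ys
  induction ys with
  | nil => intro zs _; rfl
  | cons y ys ih =>
      intro zs h
      have hy : bef x y = false := h y (by simp)
      simp [PySem.List.insertBy, hy, ih zs (fun z hz => h z (by simp [hz]))]

-- splitting an insY insertion on a yc-sorted list
lemma pvInsY_split (d : pvCell) :
    ∀ S : List pvCell, S.Pairwise (fun a b => pvYc a ≤ pvYc b) →
      ∃ S₁ S₂, PySem.List.insertBy pvBefY d S = S₁ ++ d :: S₂ ∧ S = S₁ ++ S₂ ∧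
        (∀ a ∈ S₁, pvYc a ≤ pvYc d) ∧ (∀ e ∈ S₂, pvYc d < pvYc e) := by
  intro S
  induction S with
  | nil => intro _; exact ⟨[], [], rfl, rfl, by simp, by simp⟩
  | cons a S ih =>
      intro hp
      by_cases h : pvBefY d a = true
      · refine ⟨[], a :: S, by simp [PySem.List.insertBy, h], rfl, by simp, ?_⟩
        intro e he
        have hda : pvYc d < pvYc a := by simpa [pvBefY] using h
        rcases List.mem_cons.1 he with rfl | he
        · exact hda
        · have := (List.pairwise_cons.1 hp).1 e he; omega
      · rcases ih (List.pairwise_cons.1 hp).2 with ⟨S₁, S₂, h1, h2, h3, h4⟩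
        refine ⟨a :: S₁, S₂, by simp [PySem.List.insertBy, h, h1], by simp [h2], ?_, h4⟩
        intro x hx
        rcases List.mem_cons.1 hx with rfl | hx
        · have : ¬ pvYc d < pvYc x := by simpa [pvBefY] using h
          omega
        · exact h3 x hx

-- inserting by X equals inserting by (X,Y) lex when everything present has smaller-or-equal yc
lemma pvInsX_eq_insLex (d : pvCell) (M : List pvCell) (h : ∀ a ∈ M, pvYc a ≤ pvYc d) :
    PySem.List.insertBy pvBefX d M = PySem.List.insertBy pvLexBef d M := by
  induction M with
  | nil => rfl
  | cons a M ih =>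
      have ha : pvYc a ≤ pvYc d := h a (by simp)
      have hbef : pvLexBef d a = pvBefX d a := by
        simp [pvLexBef, pvBefX, show ¬ (pvYc d < pvYc a) by omega]
      cases hb : pvBefX d a with
      | true => simp [PySem.List.insertBy, hb, hbef]
      | false =>
          simp [PySem.List.insertBy, hb, hbef, ih (fun a ha => h a (by simp [ha]))]

-- the two insertions commute when yc strictly separates them
lemma pvCommute (d e : pvCell) (hde : pvYc d < pvYc e) :
    ∀ M, PySem.List.insertBy pvBefX e (PySem.List.insertBy pvLexBef d M) =
      PySem.List.insertBy pvLexBef d (PySem.List.insertBy pvBefX e M) := by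
  intro M
  induction M with
  | nil =>
      by_cases h : pvXc e < pvXc d
      · simp [PySem.List.insertBy, pvBefX, pvLexBef, h, show ¬ pvXc d < pvXc e by omega]
      · simp [PySem.List.insertBy, pvBefX, pvLexBef, h, hde]
  | cons a M ih =>
      have hlexde : pvLexBef d e = !pvBefX e d := by
        simp only [pvLexBef, pvBefX]
        by_cases h5 : pvXc e < pvXc d <;> by_cases h6 : pvXc d < pvXc e
        · omega
        · simp [h5, h6]
        · simp [h5, h6]
        · simp [h5, h6, hde]
      by_cases bda : pvLexBef d a = true <;> by_cases bea : pvBefX e a = true <;>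
        by_cases bed : pvBefX e d = true
      · simp [PySem.List.insertBy, bda, bea, bed, hlexde]
      · simp [PySem.List.insertBy, bda, bea, bed, hlexde]
      · have h1 : (pvXc d < pvXc a) ∨ (¬ (pvXc a < pvXc d) ∧ pvYc d < pvYc a) := by
          simpa [pvLexBef] using bda
        have h2 : ¬ (pvXc e < pvXc a) := by simpa [pvBefX] using bea
        have h3 : pvXc e < pvXc d := by simpa [pvBefX] using bed
        omega
      · simp [PySem.List.insertBy, bda, bea, bed]
      · simp [PySem.List.insertBy, bda, bea, bed, hlexde]
      · have h1 : ¬ ((pvXc d < pvXc a) ∨ (¬ (pvXc a < pvXc d) ∧ pvYc d < pvYc a)) := by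
          simpa [pvLexBef] using bda
        have h2 : pvXc e < pvXc a := by simpa [pvBefX] using bea
        have h3 : ¬ (pvXc e < pvXc d) := by simpa [pvBefX] using bed
        omega
      · simp [PySem.List.insertBy, bda, bea, ih]
      · simp [PySem.List.insertBy, bda, bea, ih]

lemma pvFoldX_insLex (d : pvCell) :
    ∀ (S₂ : List pvCell) (M : List pvCell), (∀ e ∈ S₂, pvYc d < pvYc e) →
      S₂.foldl (fun acc x => PySem.List.insertBy pvBefX x acc) (PySem.List.insertBy pvLexBef d M)
        = PySem.List.insertBy pvLexBef d (S₂.foldl (fun acc x => PySem.List.insertBy pvBefX x acc) M) := by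
  intro S₂
  induction S₂ with
  | nil => intro M _; rfl
  | cons e S₂ ih =>
      intro M h
      simp only [List.foldl_cons]
      rw [pvCommute d e (h e (by simp)) M]
      exact ih _ (fun x hx => h x (by simp [hx]))

-- STEP: sorting-by-x an insY-insertion = lex-inserting into the x-sort
lemma pvStep (d : pvCell) (S : List pvCell) (hS : S.Pairwise (fun a b => pvYc a ≤ pvYc b)) :
    pvSortX (PySem.List.insertBy pvBefY d S) = PySem.List.insertBy pvLexBef d (pvSortX S) := by
  rcases pvInsY_split d S hS with ⟨S₁, S₂, h1, h2, h3, h4⟩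
  rw [h1]
  unfold pvSortX
  rw [List.foldl_append, List.foldl_cons]
  have hmem : ∀ a ∈ List.foldl (fun acc x => PySem.List.insertBy pvBefX x acc) [] S₁, pvYc a ≤ pvYc d := by
    intro a ha
    rcases pvMem_foldl_insertBy pvBefX S₁ [] a ha with hh | hh
    · simp at hh
    · exact h3 a hh
  rw [pvInsX_eq_insLex d _ hmem, pvFoldX_insLex d S₂ _ h4, ← List.foldl_append, ← h2]

-- stable-sort composition: sort by xc after sort by yc = one sort by (xc, yc)
lemma pvSortXY (r : List pvCell) : pvSortX (pvSortY r) = pvSortL r := by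
  induction r using List.reverseRecOn with
  | nil => rfl
  | append_singleton r c ih =>
      have hp : (pvSortY r).Pairwise (fun a b => pvYc a ≤ pvYc b) := by
        rw [← pvSortY_eq]
        exact PySem.List.sorted_pairwise r (fun d => pvYc d)
      have h1 : pvSortY (r ++ [c]) = PySem.List.insertBy pvBefY c (pvSortY r) := by
        unfold pvSortY; rw [List.foldl_append]; rfl
      have h2 : pvSortL (r ++ [c]) = PySem.List.insertBy pvLexBef c (pvSortL r) := by
        unfold pvSortL; rw [List.foldl_append]; rfl
      rw [h1, pvStep c _ hp, ih, h2]

-- filtering commutes with an insY insertion on a sorted list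
lemma pvFilter_insY (p : pvCell → Bool) (c : pvCell) (S : List pvCell)
    (hS : S.Pairwise (fun a b => pvYc a ≤ pvYc b)) :
    (PySem.List.insertBy pvBefY c S).filter p =
      if p c then PySem.List.insertBy pvBefY c (S.filter p) else S.filter p := by
  rcases pvInsY_split c S hS with ⟨S₁, S₂, h1, h2, h3, h4⟩
  subst h2
  rw [h1, List.filter_append, List.filter_append, List.filter_cons]
  by_cases hc : p c
  · rw [if_pos hc, if_pos hc]
    have hpass : PySem.List.insertBy pvBefY c (S₁.filter p ++ S₂.filter p)
        = S₁.filter p ++ PySem.List.insertBy pvBefY c (S₂.filter p) := by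
      refine pvInsertBy_pass pvBefY c _ _ ?_
      intro a ha
      have := h3 a (List.mem_of_mem_filter ha)
      simp [pvBefY]; omega
    have hfront : PySem.List.insertBy pvBefY c (S₂.filter p) = c :: S₂.filter p := by
      cases hfp : S₂.filter p with
      | nil => rfl
      | cons e tail =>
          have he : e ∈ S₂ := List.mem_of_mem_filter (by rw [hfp]; exact List.mem_cons_self ..)
          have hbe : pvBefY c e = true := by
            simp only [pvBefY, decide_eq_true_eq]
            exact h4 e he
          simp [PySem.List.insertBy, hbe]
    rw [hpass, hfront]
  · rw [if_neg hc, if_neg hc]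

-- filtering commutes with the stable yc-sort
lemma pvFilter_sortY (p : pvCell → Bool) (l : List pvCell) :
    (pvSortY l).filter p = pvSortY (l.filter p) := by
  induction l using List.reverseRecOn with
  | nil => rfl
  | append_singleton l c ih =>
      have hp : (pvSortY l).Pairwise (fun a b => pvYc a ≤ pvYc b) := by
        rw [← pvSortY_eq]
        exact PySem.List.sorted_pairwise l (fun d => pvYc d)
      have h1 : pvSortY (l ++ [c]) = PySem.List.insertBy pvBefY c (pvSortY l) := by
        unfold pvSortY; rw [List.foldl_append]; rfl
      rw [h1, pvFilter_insY p c _ hp, List.filter_append, List.filter_cons]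
      by_cases hc : p c
      · rw [if_pos hc, if_pos hc, ih]
        have h2 : pvSortY (l.filter p ++ [c]) = PySem.List.insertBy pvBefY c (pvSortY (l.filter p)) := by
          unfold pvSortY; rw [List.foldl_append]; rfl
        simpa using h2.symm
      · rw [if_neg hc, if_neg hc, ih]
        simp

-- grouping a sorted run: the first group is the takeWhile-prefix within t of the anchor
lemma pvGroupsGo_eq (t : Int) :
    ∀ (rest : List pvCell) (h : pvCell) (c' : List pvCell),
      (∀ e ∈ rest, pvYc h ≤ pvYc e) → rest.Pairwise (fun a b => pvYc a ≤ pvYc b) →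
      pvGroupsGo t h c' rest =
        ((h :: c') ++ rest.takeWhile (fun d => decide (pvYc d - pvYc h < t))) ::
          pvGroups t (rest.dropWhile (fun d => decide (pvYc d - pvYc h < t))) := by
  intro rest
  induction rest with
  | nil => intro h c' _ _; simp [pvGroupsGo, pvGroups]
  | cons d r ih =>
      intro h c' hall hp
      have hyd : pvYc h ≤ pvYc d := hall d (by simp)
      have habs : |pvYc d - pvYc h| = pvYc d - pvYc h := abs_of_nonneg (by omega)
      by_cases hc : pvYc d - pvYc h < t
      · have := ih h (c' ++ [d]) (fun e he => hall e (by simp [he])) (List.pairwise_cons.1 hp).2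
        simp only [pvGroupsGo, habs, this,
          List.takeWhile_cons, List.dropWhile_cons, decide_eq_true_eq, hc, if_pos]
        simp
      · simp only [pvGroupsGo, habs, if_neg hc,
          List.takeWhile_cons, List.dropWhile_cons, decide_eq_true_eq, hc, if_neg]
        simp [pvGroups]

-- on a sorted run, the within-t predicate is a prefix property
lemma pvTakeWhile_filter (t : Int) (h : pvCell) :
    ∀ (l : List pvCell), (∀ e ∈ l, pvYc h ≤ pvYc e) → l.Pairwise (fun a b => pvYc a ≤ pvYc b) →
      l.takeWhile (fun d => decide (pvYc d - pvYc h < t)) = l.filter (fun d => decide (pvYc d - pvYc h < t)) ∧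
      l.dropWhile (fun d => decide (pvYc d - pvYc h < t)) = l.filter (fun d => decide (t ≤ pvYc d - pvYc h)) := by
  intro l
  induction l with
  | nil => intro _ _; exact ⟨rfl, rfl⟩
  | cons d r ih =>
      intro hall hp
      have hhd : pvYc h ≤ pvYc d := hall d (by simp)
      by_cases hc : pvYc d - pvYc h < t
      · have := ih (fun e he => hall e (by simp [he])) (List.pairwise_cons.1 hp).2
        simp only [List.takeWhile_cons, List.dropWhile_cons, List.filter_cons,
          decide_eq_true_eq, hc, if_pos, this.1, this.2]
        simp [show ¬ t ≤ pvYc d - pvYc h by omega]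
      · have hge : ∀ e ∈ d :: r, ¬ (pvYc e - pvYc h < t) := by
          intro e he
          rcases List.mem_cons.1 he with rfl | he
          · exact hc
          · have := (List.pairwise_cons.1 hp).1 e he; omega
        refine ⟨?_, ?_⟩
        · rw [List.takeWhile_cons_of_neg (by simpa using hc)]
          symm
          rw [List.filter_eq_nil_iff]
          intro e he
          simpa using hge e he
        · rw [List.dropWhile_cons_of_neg (by simpa using hc)]
          symm
          rw [List.filter_eq_self]
          intro e he
          simp only [decide_eq_true_eq]
          have := hge e he; omega

-- degenerate threshold: every cell its own row
lemma pvGroups_nonpos (t : Int) (ht : t ≤ 0) :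
    ∀ l : List pvCell, pvGroups t l = l.map (fun d => [d]) := by
  have aux : ∀ (rest : List pvCell) (h : pvCell) (c' : List pvCell),
      pvGroupsGo t h c' rest = (h :: c') :: rest.map (fun d => [d]) := by
    intro rest
    induction rest with
    | nil => intro h c'; rfl
    | cons d r ih =>
        intro h c'
        have hna : ¬ |pvYc d - pvYc h| < t := by
          have := abs_nonneg (pvYc d - pvYc h); omega
        simp [pvGroupsGo, hna, ih]
  intro l
  cases l with
  | nil => rfl
  | cons d rest => simpa [pvGroups] using aux rest d []

-- the main fuel induction for 1 ≤ t
lemma pvMainPos (t : Int) (ht : 1 ≤ t) :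
    ∀ (fuel : Nat) (l : List pvCell), l.length ≤ fuel →
      ((pvGroups t (pvSortY l)).map (fun g => pvSortX g)).flatten = pvPeel t fuel l := by
  intro fuel
  induction fuel with
  | zero =>
      intro l hl
      have hnil : l = [] := by
        cases l with
        | nil => rfl
        | cons a b => simp at hl
      subst hnil; rfl
  | succ fuel ih =>
      intro l hl
      cases l with
      | nil => rfl
      | cons r0 rs =>
        cases hs : pvSortY (r0 :: rs) with
        | nil =>
            exfalso
            have : (r0 :: rs : List pvCell) = [] :=
              (PySem.List.sorted_eq_nil_iff (r0 :: rs) (fun d => pvYc d) false).1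
                (by rw [pvSortY_eq]; exact hs)
            simp at this
        | cons h srest =>
            have hs' : PySem.List.sorted (r0 :: rs) (fun d => pvYc d) false = h :: srest := by
              rw [pvSortY_eq]; exact hs
            have hmin : ∀ z ∈ (r0 :: rs : List pvCell), pvYc h ≤ pvYc z :=
              PySem.List.key_head_sorted_le (r0 :: rs) (fun d => pvYc d) hs'
            have hpair : (h :: srest).Pairwise (fun a b => pvYc a ≤ pvYc b) :=
              hs' ▸ PySem.List.sorted_pairwise (r0 :: rs) (fun d => pvYc d)
            have hall : ∀ e ∈ srest, pvYc h ≤ pvYc e := (List.pairwise_cons.1 hpair).1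
            have hpr : srest.Pairwise (fun a b => pvYc a ≤ pvYc b) := (List.pairwise_cons.1 hpair).2
            have hmem_h : h ∈ (r0 :: rs : List pvCell) := by
              have : h ∈ PySem.List.sorted (r0 :: rs) (fun d => pvYc d) false := by
                rw [hs']; exact List.mem_cons_self ..
              exact (PySem.List.mem_sorted (r0 :: rs) (fun d => pvYc d) false h).1 this
            -- B's minimum is the yc of the sorted head
            obtain ⟨v, hv⟩ : ∃ v, PySem.List.min? ((r0 :: rs).map (fun d => pvYc d)) (fun v => v) = some v := by
              cases hmv : PySem.List.min? ((r0 :: rs).map (fun d => pvYc d)) (fun v => v) with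
              | none =>
                  exact absurd ((PySem.List.min?_eq_none_iff _ _).1 hmv) (by simp)
              | some v => exact ⟨v, rfl⟩
            have hvmem : v ∈ (r0 :: rs).map (fun d => pvYc d) := PySem.List.min?_mem hv
            have hvmin : ∀ w ∈ (r0 :: rs).map (fun d => pvYc d), v ≤ w := PySem.List.min?_isMin hv
            have hm : v = pvYc h := by
              refine le_antisymm (hvmin _ (List.mem_map_of_mem hmem_h)) ?_
              rcases List.mem_map.1 hvmem with ⟨z, hz, rfl⟩
              exact hmin z hz
            -- predicates for the first row and the remainder
            have hph : decide (pvYc h - pvYc h < t) = true := by simp; omega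
            have hqh : decide (t ≤ pvYc h - pvYc h) = false := by simp; omega
            -- peel one row off the A side
            have hA : ((pvGroups t (h :: srest)).map (fun g => pvSortX g)).flatten =
                pvSortX (pvSortY ((r0 :: rs).filter (fun d => decide (pvYc d - pvYc h < t)))) ++
                  ((pvGroups t (pvSortY ((r0 :: rs).filter (fun d => decide (t ≤ pvYc d - pvYc h))))).map
                    (fun g => pvSortX g)).flatten := by
              show ((pvGroupsGo t h [] srest).map (fun g => pvSortX g)).flatten = _
              rw [pvGroupsGo_eq t srest h [] hall hpr,
                (pvTakeWhile_filter t h srest hall hpr).1,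
                (pvTakeWhile_filter t h srest hall hpr).2]
              have hg1 : (h :: []) ++ srest.filter (fun d => decide (pvYc d - pvYc h < t)) =
                  (h :: srest).filter (fun d => decide (pvYc d - pvYc h < t)) := by
                rw [List.filter_cons, if_pos hph]; rfl
              have hg2 : srest.filter (fun d => decide (t ≤ pvYc d - pvYc h)) =
                  (h :: srest).filter (fun d => decide (t ≤ pvYc d - pvYc h)) := by
                rw [List.filter_cons, hqh]; rfl
              rw [hg1, hg2, ← hs, pvFilter_sortY, pvFilter_sortY]
              simp
            rw [hA]
            -- peel one iteration off the B side
            have hB : pvPeel t (fuel + 1) (r0 :: rs) =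
                PySem.List.sorted2 ((r0 :: rs).filter (fun d => decide (pvYc d - pvYc h < t)))
                    (fun d => pvXc d) (fun d => pvYc d) false ++
                  pvPeel t fuel ((r0 :: rs).filter (fun d => decide (t ≤ pvYc d - pvYc h))) := by
              show (PySem.List.sorted2 _ _ _ false ++ _ : List pvCell) = _
              rw [hv]
              simp only [Option.getD_some, hm]
            rw [hB, pvSortL_eq, ← pvSortXY]
            congr 1
            refine ih _ ?_
            have hlt : ((r0 :: rs).filter (fun d => decide (t ≤ pvYc d - pvYc h))).length <
                (r0 :: rs).length :=
              List.length_filter_lt_length_iff_exists.2 ⟨h, hmem_h, by simp; omega⟩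
            simp only [List.length_cons] at hl hlt ⊢
            omega

-- ===== VERDICT (by name: the statement is the Claim_ definition above) =====
theorem sort_table_by_rows_spec : Claim_equal_sort_table_by_rows := by
  intro table threshold _ _
  unfold Spec_sort_table_by_rows
  rw [pvA_char]
  unfold sort_table_by_rows_alt
  by_cases ht : threshold ≤ 0
  · rw [if_pos ht, pvGroups_nonpos threshold ht, pvSortY_eq]
    induction pvSortY table with
    | nil => rfl
    | cons a l ih => simpa [pvSortX, PySem.List.insertBy] using ih
  · rw [if_neg ht]
    exact pvMainPos threshold (by omega) table.length table le_rfl
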